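-- pv_equiv track=rewrite | github.com/sadki-mdsol/DSA_Program | Array/Array_2011.py | operationArray
-- ===== SOURCE A (Python) =====
-- def operationArray(arr):
--     x = 0
--     for a in arr:
--         if a in ('++X','X++'):
--             x=x+1
--         elif a in ('--X','X--'):
--             x= x-1
--     return x
-- ===== SOURCE B (Python) =====
-- def operationArray(arr):
--     # Divide and conquer: map a single token to its delta at the leaves,
--     # combine halves by addition.
--     def go(lo, hi):
--         if hi - lo == 0:
--             return 0
--         if hi - lo == 1:
--             a = arr[lo]
--             if a in ('++X', 'X++'):
--                 return 1
--             if a in ('--X', 'X--'):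
--                 return -1
--             return 0
--         mid = (lo + hi) // 2
--         return go(lo, mid) + go(mid, hi)
--     return go(0, len(arr))
-- ===== Notes on version B (the rewrite author's own statement) =====
-- stated objective: alternative
-- what changed: Replaces A's sequential accumulator loop with a divide-and-conquer recursion that maps single tokens to +1/-1/0 at the leaves and combines halves by addition.
import Mathlib
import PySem

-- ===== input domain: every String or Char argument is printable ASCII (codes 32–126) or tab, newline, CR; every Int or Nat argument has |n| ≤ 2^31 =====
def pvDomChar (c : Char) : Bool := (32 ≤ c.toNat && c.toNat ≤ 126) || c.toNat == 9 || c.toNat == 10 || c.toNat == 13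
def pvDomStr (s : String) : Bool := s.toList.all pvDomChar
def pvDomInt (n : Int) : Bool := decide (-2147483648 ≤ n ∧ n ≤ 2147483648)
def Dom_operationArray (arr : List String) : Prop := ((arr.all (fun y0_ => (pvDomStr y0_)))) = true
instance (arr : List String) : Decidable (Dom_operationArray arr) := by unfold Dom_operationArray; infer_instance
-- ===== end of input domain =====

-- B replaces A's sequential accumulator loop with a divide-and-conquer recursion over index ranges (alternative decomposition, same cost).

-- ===== PORT A =====
def operationArray (arr : List String) : Int :=
  arr.foldl
    (fun x a =>
      if a = "++X" ∨ a = "X++" then x + 1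
      else if a = "--X" ∨ a = "X--" then x - 1
      else x) 0

-- ===== PORT B =====
-- go(lo, hi) of Source B; arr[lo] is in range whenever hi ≤ len(arr) (the only call chain),
-- ported via getElem? with a 0 default that is never reached on those calls.
def opGo (arr : List String) (lo hi : Nat) : Int :=
  if hi - lo = 0 then 0
  else if hi - lo = 1 then
    match arr[lo]? with
    | some a =>
        if a = "++X" ∨ a = "X++" then 1
        else if a = "--X" ∨ a = "X--" then -1
        else 0
    | none => 0
  else
    opGo arr lo ((lo + hi) / 2) + opGo arr ((lo + hi) / 2) hi
termination_by hi - lo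
decreasing_by all_goals omega

def operationArray_alt (arr : List String) : Int := opGo arr 0 arr.length

-- ===== PRECONDITION & SPEC =====
def Spec_operationArray (arr : List String) (out : Int) : Prop := out = operationArray_alt arr
instance (arr : List String) (out : Int) : Decidable (Spec_operationArray arr out) := by unfold Spec_operationArray; infer_instance

-- ===== CLAIM (what is proved, stated in full; the proofs are below) =====
def Claim_equal_operationArray : Prop := ∀ (arr : List String), Dom_operationArray arr → Spec_operationArray arr (operationArray arr)

-- ===== LEMMAS AND PROOFS =====

def pvDelta (a : String) : Int :=
  if a = "++X" ∨ a = "X++" then 1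
  else if a = "--X" ∨ a = "X--" then -1
  else 0

theorem operationArray_foldl_acc (arr : List String) (x : Int) :
    arr.foldl
      (fun x a =>
        if a = "++X" ∨ a = "X++" then x + 1
        else if a = "--X" ∨ a = "X--" then x - 1
        else x) x
    = x + (arr.map pvDelta).sum := by
  induction arr generalizing x with
  | nil => simp
  | cons a t ih =>
    simp only [List.foldl_cons, ih, List.map_cons, List.sum_cons, pvDelta]
    split_ifs <;> ring

theorem opGo_sum (arr : List String) :
    ∀ n lo hi, hi - lo = n → hi ≤ arr.length →
      opGo arr lo hi = (((arr.drop lo).take (hi - lo)).map pvDelta).sum := by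
  intro n
  induction n using Nat.strong_induction_on with
  | _ n ih =>
    intro lo hi hn hle
    rw [opGo]
    by_cases h0 : hi - lo = 0
    · simp [h0]
    · by_cases h1 : hi - lo = 1
      · have hlt : lo < arr.length := by omega
        simp only [h1]
        rw [List.getElem?_eq_getElem hlt]
        have : (arr.drop lo).take 1 = [arr[lo]] := by
          rw [List.take_one]
          simp [List.head?_drop, List.getElem?_eq_getElem hlt]
        simp [this, pvDelta]
      · have hmid : lo ≤ (lo + hi) / 2 ∧ (lo + hi) / 2 ≤ hi := by omega
        simp only [h0, h1, if_false]
        rw [ih ((lo + hi) / 2 - lo) (by omega) lo _ rfl (by omega),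
            ih (hi - (lo + hi) / 2) (by omega) _ hi rfl hle]
        have hsplit : (arr.drop lo).take (hi - lo)
            = (arr.drop lo).take ((lo + hi) / 2 - lo)
              ++ (arr.drop ((lo + hi) / 2)).take (hi - (lo + hi) / 2) := by
          have : hi - lo = ((lo + hi) / 2 - lo) + (hi - (lo + hi) / 2) := by omega
          have h2 : lo + ((lo + hi) / 2 - lo) = (lo + hi) / 2 := by omega
          rw [this, List.take_add, List.drop_drop, h2]
        rw [hsplit, List.map_append, List.sum_append]

-- ===== VERDICT (by name: the statement is the Claim_ definition above) =====
theorem operationArray_spec : Claim_equal_operationArray := by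
  intro arr _
  show operationArray arr = operationArray_alt arr
  rw [operationArray, operationArray_alt, operationArray_foldl_acc,
      opGo_sum arr arr.length 0 arr.length rfl le_rfl]
  simp
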